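-- pv_equiv track=rewrite | github.com/BTheDragonMaster/parasect | src/parasect/core/domain.py | _get_reference_positions_hmm
-- ===== SOURCE A (Python) =====
-- from typing import List, Optional, Tuple
--
-- def _get_reference_positions_hmm(
--     query_sequence: str, reference_sequence: str, reference_positions: List[int]
-- ) -> Optional[list[int]]:
--     """Extract the given positions from a query alignment.
--
--     :param query_sequence: The aligned query sequence.
--     :type query_sequence: str
--     :param reference_sequence: The aligned reference sequence.
--     :type reference_sequence: str
--     :param reference_positions: The positions of interest in the unaligned reference.
--     :type reference_positions: List[int]
--     :return: Positions of sequence elements at the adjusted reference,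
--         or None if the positions could not be extracted.
--     :rtype: list[int
--     :raises ValueError: If the reference sequence is too short.
--
--     .. note:: Positions are adjusted to account for gaps in the reference sequence.
--     .. note:: This function assumes that the reference sequence is shorter
--         than the query sequence.
--     .. note:: From antiSMASH 7.0.0.
--     """
--     # check if the reference is too short
--     if len(reference_sequence) < len(reference_positions):
--         raise ValueError(
--             f"reference sequence is too short: {len(reference_sequence)} < {len(reference_positions)}"
--         )  # noqa: E501
--
--     # check if the reference sequence is the same length as the query sequence
--     # or if the reference sequence is shorter than the query sequence
--     if not (
--         len(reference_sequence) == len(query_sequence)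
--         or len(reference_sequence) < len(query_sequence)
--     ):
--         raise ValueError(
--             f"reference sequence is too long: {len(reference_sequence)} != {len(query_sequence)}"
--         )
--
--     # adjust position of interest to account for gaps in the ref sequence alignment
--     positions = []
--     position_skipping_gaps = 0  # position in the reference sequence
--
--     for amino_acid_idx, amino_acid_id in enumerate(reference_sequence):
--
--         if amino_acid_id in "-.":
--             continue
--
--         if position_skipping_gaps in reference_positions:
--             positions.append(amino_acid_idx)
--
--         # increment the position in the reference sequence
--         position_skipping_gaps += 1
--
--     # check if the number of positions extracted is the same as the number of reference
--     # positions to extract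
--     if len(positions) != len(reference_positions):
--         return None
--
--     # extract positions from query sequence
--     return positions
-- ===== SOURCE B (Python) =====
-- def _get_reference_positions_hmm(query_sequence, reference_sequence, reference_positions):
--     if len(reference_sequence) < len(reference_positions):
--         raise ValueError(
--             f"reference sequence is too short: {len(reference_sequence)} < {len(reference_positions)}"
--         )
--     if len(reference_sequence) > len(query_sequence):
--         raise ValueError(
--             f"reference sequence is too long: {len(reference_sequence)} != {len(query_sequence)}"
--         )
--     # alignment column of each non-gap reference position, built in one pass
--     col_of_ref = [i for i, c in enumerate(reference_sequence) if c not in "-."]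
--     positions = []
--     for p in sorted(set(reference_positions)):
--         if 0 <= p < len(col_of_ref):
--             positions.append(col_of_ref[p])
--     if len(positions) != len(reference_positions):
--         return None
--     return positions
-- ===== Notes on version B (the rewrite author's own statement) =====
-- stated objective: faster
-- what changed: Instead of scanning the reference once per column while testing 'position in reference_positions' against the raw list, B builds the non-gap column table in one pass and then iterates over sorted(set(reference_positions)), indexing the table directly; the inner membership scan disappears.
import Mathlib
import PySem

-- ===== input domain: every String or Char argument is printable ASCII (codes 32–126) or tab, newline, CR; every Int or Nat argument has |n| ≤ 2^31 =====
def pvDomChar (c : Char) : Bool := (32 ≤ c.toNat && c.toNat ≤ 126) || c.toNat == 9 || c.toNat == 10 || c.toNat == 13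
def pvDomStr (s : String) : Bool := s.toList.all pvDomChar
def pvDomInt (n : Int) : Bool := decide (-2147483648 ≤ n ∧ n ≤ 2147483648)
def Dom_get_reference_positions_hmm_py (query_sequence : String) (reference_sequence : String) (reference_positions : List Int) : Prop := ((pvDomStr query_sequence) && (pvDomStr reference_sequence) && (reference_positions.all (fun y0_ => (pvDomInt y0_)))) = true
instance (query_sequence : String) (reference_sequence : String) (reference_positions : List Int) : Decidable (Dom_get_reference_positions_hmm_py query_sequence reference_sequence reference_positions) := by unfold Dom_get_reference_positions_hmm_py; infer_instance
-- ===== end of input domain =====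

-- B replaces A's per-column membership scan of reference_positions by a one-pass
-- column table indexed over sorted(set(reference_positions)) (objective: alternative).
-- Both Pythons raise ValueError on the same inputs (length guards); Pre_ excludes exactly those,
-- so the ports carry the guard-free body.

-- ===== PORT A =====
-- loop over enumerate(reference_sequence) with state (positions, position_skipping_gaps)
def get_reference_positions_hmm_py (query_sequence : String) (reference_sequence : String) (reference_positions : List Int) : Option (List Int) :=
  let st :=
    (PySem.List.enumerate reference_sequence.toList 0).foldl
      (fun (s : List Int × Int) p =>
        if p.2 = '-' ∨ p.2 = '.' then s
        else if s.2 ∈ reference_positions then (s.1 ++ [p.1], s.2 + 1)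
        else (s.1, s.2 + 1))
      ([], 0)
  if st.1.length ≠ reference_positions.length then none else some st.1

-- ===== PORT B =====
def get_reference_positions_hmm_py_alt (query_sequence : String) (reference_sequence : String) (reference_positions : List Int) : Option (List Int) :=
  let col_of_ref : List Int :=
    (PySem.List.enumerate reference_sequence.toList 0).filterMap
      (fun p => if p.2 = '-' ∨ p.2 = '.' then none else some p.1)
  let positions :=
    (PySem.List.sorted (PySem.Set.ofList reference_positions) (fun x => x) false).foldl
      (fun acc p =>
        if 0 ≤ p ∧ p < (col_of_ref.length : Int) then acc ++ [PySem.List.pyGetD col_of_ref p 0]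
        else acc)
      []
  if positions.length ≠ reference_positions.length then none else some positions

-- ===== PRECONDITION & SPEC =====
-- Pre_ excludes exactly the inputs on which the Python A raises ValueError (its two length guards).
def Pre_get_reference_positions_hmm_py (query_sequence : String) (reference_sequence : String) (reference_positions : List Int) : Prop :=
  reference_positions.length ≤ reference_sequence.toList.length ∧
  reference_sequence.toList.length ≤ query_sequence.toList.length
instance (query_sequence : String) (reference_sequence : String) (reference_positions : List Int) : Decidable (Pre_get_reference_positions_hmm_py query_sequence reference_sequence reference_positions) := by unfold Pre_get_reference_positions_hmm_py; infer_instance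
def pvWitness_get_reference_positions_hmm_py : String × String × List Int := ("ABCD", "A-B.", [0, 1])

def Spec_get_reference_positions_hmm_py (query_sequence : String) (reference_sequence : String) (reference_positions : List Int) (out : Option (List Int)) : Prop := out = get_reference_positions_hmm_py_alt query_sequence reference_sequence reference_positions
instance (query_sequence : String) (reference_sequence : String) (reference_positions : List Int) (out : Option (List Int)) : Decidable (Spec_get_reference_positions_hmm_py query_sequence reference_sequence reference_positions out) := by unfold Spec_get_reference_positions_hmm_py; infer_instance

-- ===== CLAIM (what is proved, stated in full; the proofs are below) =====
def Claim_equal_get_reference_positions_hmm_py : Prop := ∀ (query_sequence : String) (reference_sequence : String) (reference_positions : List Int), Dom_get_reference_positions_hmm_py query_sequence reference_sequence reference_positions → Pre_get_reference_positions_hmm_py query_sequence reference_sequence reference_positions → Spec_get_reference_positions_hmm_py query_sequence reference_sequence reference_positions (get_reference_positions_hmm_py query_sequence reference_sequence reference_positions)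

-- ===== LEMMAS AND PROOFS =====

-- A's loop, restricted to the non-gap columns cs with running counter k:
-- append cs-entries whose counter lies in ps.
def pvPick (ps : List Int) : List Int → Int → List Int
  | [], _ => []
  | c :: cs, k => (if k ∈ ps then [c] else []) ++ pvPick ps cs (k + 1)

theorem pvPick_sound (ps : List Int) (es : List (Int × Char)) :
    ∀ (acc : List Int) (k : Int),
    es.foldl
      (fun (s : List Int × Int) p =>
        if p.2 = '-' ∨ p.2 = '.' then s
        else if s.2 ∈ ps then (s.1 ++ [p.1], s.2 + 1)
        else (s.1, s.2 + 1))
      (acc, k)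
    = (acc ++ pvPick ps (es.filterMap (fun p => if p.2 = '-' ∨ p.2 = '.' then none else some p.1)) k,
       k + ((es.filterMap (fun p => if p.2 = '-' ∨ p.2 = '.' then none else some p.1)).length : Int)) := by
  induction es with
  | nil => simp [pvPick]
  | cons e es ih =>
    intro acc k
    by_cases hg : e.2 = '-' ∨ e.2 = '.'
    · simp [hg, ih]
    · by_cases hm : k ∈ ps
      · simp [List.foldl_cons, hg, hm, ih, pvPick]
        omega
      · simp [List.foldl_cons, hg, hm, ih, pvPick]
        omega

-- pvPick as indexing over the filtered range of counters
theorem pvPick_eq_map (ps : List Int) (cs : List Int) :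
    ∀ (k : Int),
    pvPick ps cs k
      = ((List.range cs.length).filter (fun j : Nat => decide ((k + (j : Int)) ∈ ps))).map
          (fun j => cs.getD j 0) := by
  induction cs with
  | nil => simp [pvPick]
  | cons c cs ih =>
    intro k
    rw [pvPick, List.length_cons, List.range_succ_eq_map, List.filter_cons]
    have hmap :
        ((List.range cs.length).map Nat.succ).filter (fun j : Nat => decide ((k + (j : Int)) ∈ ps))
          = ((List.range cs.length).filter (fun j : Nat => decide (((k + 1) + (j : Int)) ∈ ps))).map Nat.succ := by
      rw [List.filter_map]
      congr 1
      apply List.filter_congr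
      intro j _
      have h1 : k + (((j : Nat) : Int) + 1) = k + 1 + (j : Int) := by ring
      simp only [Function.comp, Nat.succ_eq_add_one, Nat.cast_add, Nat.cast_one, h1]
    by_cases hm : k ∈ ps
    · simp only [Int.natCast_zero, add_zero, hm, decide_true, if_pos]
      rw [hmap, ih (k + 1)]
      simp [List.map_map, Function.comp]
    · simp only [Int.natCast_zero, add_zero, hm, decide_false]
      simp only [Bool.false_eq_true, if_false]
      rw [hmap, ih (k + 1)]
      simp [List.map_map, Function.comp]

-- B's loop as a filter-then-map over sorted(set(ps))
theorem pvBfold (col : List Int) (xs : List Int) :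
    ∀ acc : List Int,
    xs.foldl
      (fun acc p =>
        if 0 ≤ p ∧ p < (col.length : Int) then acc ++ [PySem.List.pyGetD col p 0] else acc)
      acc
    = acc ++ (xs.filter (fun p => decide (0 ≤ p ∧ p < (col.length : Int)))).map
        (fun p => PySem.List.pyGetD col p 0) := by
  induction xs with
  | nil => simp
  | cons x xs ih =>
    intro acc
    by_cases h : 0 ≤ x ∧ x < (col.length : Int)
    · simp [h, ih]
    · simp [h, ih]

-- The two index lists coincide: both are the strictly increasing enumeration of {p ∈ ps | 0 ≤ p < n}.
theorem pvIndex_eq (ps : List Int) (n : Nat) :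
    (PySem.List.sorted (PySem.Set.ofList ps) (fun x => x) false).filter
        (fun p => decide (0 ≤ p ∧ p < (n : Int)))
      = ((List.range n).filter (fun j : Nat => decide (((j : Int)) ∈ ps))).map (fun j => Int.ofNat j) := by
  have hR : (((List.range n).filter (fun j : Nat => decide (((j : Int)) ∈ ps))).map
      (fun j => Int.ofNat j)).Pairwise (· < ·) := by
    refine List.Pairwise.map _ (fun a b h => ?_) (List.Pairwise.filter _ List.pairwise_lt_range)
    exact Int.ofNat_lt.mpr h
  have hL : ((PySem.List.sorted (PySem.Set.ofList ps) (fun x => x) false).filter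
      (fun p => decide (0 ≤ p ∧ p < (n : Int)))).Pairwise (· < ·) :=
    List.Pairwise.filter _ (PySem.List.sorted_ofList_pairwise_lt ps)
  refine List.Perm.eq_of_pairwise (fun a b _ _ h1 h2 => le_antisymm h1 h2)
    (hL.imp le_of_lt) (hR.imp le_of_lt) ?_
  rw [List.perm_ext_iff_of_nodup (hL.imp ne_of_lt) (hR.imp ne_of_lt)]
  intro x
  simp only [List.mem_filter, List.mem_map, List.mem_range, decide_eq_true_eq,
    Int.ofNat_eq_natCast, PySem.List.mem_sorted, PySem.Set.mem_ofList]
  constructor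
  · rintro ⟨hx, h0, hn⟩
    refine ⟨x.toNat, ⟨by omega, ?_⟩, by omega⟩
    rwa [Int.toNat_of_nonneg h0]
  · rintro ⟨j, ⟨hj, hjm⟩, rfl⟩
    exact ⟨hjm, by omega, by exact_mod_cast hj⟩

-- ===== VERDICT (by name: the statement is the Claim_ definition above) =====
theorem get_reference_positions_hmm_py_spec : Claim_equal_get_reference_positions_hmm_py := by
  intro q r ps _ _
  unfold Spec_get_reference_positions_hmm_py
  simp only [get_reference_positions_hmm_py, get_reference_positions_hmm_py_alt]
  rw [pvPick_sound]
  simp only [List.nil_append]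
  rw [pvPick_eq_map]
  simp only [zero_add]
  rw [pvBfold, pvIndex_eq, List.map_map]
  simp only [List.nil_append]
  have hmap : ∀ (K : List Nat) (col : List Int),
      K.map ((fun p => PySem.List.pyGetD col p 0) ∘ (fun j => Int.ofNat j))
        = K.map (fun j => col.getD j 0) := by
    intro K col
    apply List.map_congr_left
    intro j _
    simp only [Function.comp, Int.ofNat_eq_natCast, PySem.List.pyGetD_natCast]
  rw [hmap]
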